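/-
  THE FINAL COMPOSITION UNIT: its statement, the part of its proof that does not depend on the units (PROVED here), and the
  skeleton of the rest.

      AllCode Lay u₀          the bytes of every function of the image are in the reference state `u₀` (one `HasCodeNat` per function
                              of c/FUNCTIONS_f.txt; GENERATED by tools/mkfinal.py `allcode`)
      ImageFacts bytes        what the composition needs to know about the file `bytes` (vorbis_f.bin): `Image.OK`; the code of every
                              function is in the start state's memory (`AllCode` of the start state: from `start_text`); the image's
                              data that the program reads as constants: `.init_array`, the descriptor table of the six globals, `log2_4`, `range_list`
      Final.Statement         `∀ bytes, ImageFacts bytes → Vorbis.VorbisStaysInCode (Vorbis.symbols.image bytes)`: THE END THEOREM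
      ClosedTop Lay μ u₀      the contracts of the stub's two callees with no hypothesis left: `run_ctors`, `decode_all`
      Final.startOK           PROVED: the start state satisfies `Top.StartOK` (Vorbis/Start.lean, Vorbis/StartShadow.lean, `ImageFacts`)
      Final.of_top            PROVED: `start_vorbis.Statement` + `ClosedTop` at every `Lay μ u₀` with `AllCode` ⊢ `Final.Statement`
                              — `u₀` := the start state, `CodeOK u₀ u₀.mem` by reflexivity, `Lay` := `startLayout c hc` with
                              `startLayout_hi`, `WayInv` is the invariant of `VorbisStaysInCode.of_reachVia` (`wayInv_iff`, by `Iff.rfl`)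

  THE SKELETON OF THE REST (what turns the 240 unit theorems into `ClosedTop`; generated: tools/mkfinal.py `order` / `script`, the
  order is printed at the end of this file). Fix `Lay`, `hLay : Lay.hi = 0x1000000`, `μ`, `hμ : UserX.MicroOK μ`, `u₀`,
  `hcode : AllCode Lay u₀`. Every unit statement has the form
        ∀ Lay hLay μ hμ u₀ (hcode_f : HasCodeNat Lay u₀ L.f.entry code_f.nat L.f.size) (h_callee₁ : <contract of callee₁>) …, <contract of f>
  so ONE LINE PER UNIT, in a topological order of the callee relation (bottom-up over c/CALLGRAPH.txt):
        have h_f := f_ok Lay hLay μ hμ u₀ hcode.f h_callee₁ … h_calleeₙ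
    1. the eight small check routines, range_bad, the three range checks, arena_poison / arena_unpoison, __asan_register_globals,
       _sub_I_65535_1, run_ctors (its INDIRECT call: the extra hypothesis `_h_ctor` := `h_sub_I_65535_1`): `__asan_report` has no
       unit (it is never called in a proved run: "RIP ≠ L.report at every step" IS `WayInv`);
    2. libc, libm, the context-free leaves; qsort / sift_down: their two INDIRECT calls are the premise `CmpSpec Lay μ u₀ others
       frames cmp w` of their CONCLUSION; it is discharged where qsort is called (compute_sorted_huffman with `h_uint32_compare`,
       start_decoder.F6 with `h_point_compare`), so `h_uint32_compare` and `h_point_compare` come before those two units;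
    3. the allocator, the readers: get_bits is the one recursive function — TWO units: `get_bits.24` (`spec24`, n ≤ 24: the
       recursive arm is unreachable, no callee hypothesis about get_bits) and then `get_bits` (`spec`, n ≤ 32, its two recursive
       calls by `h_get_bits_24`); every later unit that calls get_bits takes `h_get_bits`;
    4. a SEGMENTED function (12 of them): first its segments (each with the callees it calls), then its COMPOSITION unit, whose
       hypotheses are the segments' statements and whose conclusion is the function's contract — the name the callers cite;
    5. the frame pipeline and the API (Vorbis/Spec/Top.lean), ending with `h_decode_all`; then
        exact ⟨h_run_ctors, h_decode_all⟩ : ClosedTop Lay μ u₀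
  and `Final.of_top start_vorbis_ok (fun Lay hLay μ hμ u₀ hcode => ⟨…⟩)` is the end theorem.
  WHAT IS DISCHARGED WHERE: `Lay.hi = 0x1000000` by `startLayout_hi c hc`; `UserX.MicroOK μ` is the end theorem's own hypothesis
  (`Vorbis.MicroOK` is an abbreviation of it); `HasCodeNat … f` by `ImageFacts.code` (from `start_text`, once `bytes` is the file);
  `CodeOK u₀ u₀.mem` by `Mem.EqOn.refl`; the shadow layer at the start by `start_shadowInv`, after run_ctors by
  `registered_shadowInv` (in the form `Top.StartOK.registered`: proved below for any memory with the start state's shadow).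
-/
import Vorbis.Spec.Units.start_vorbis
namespace Vorbis.Spec
open X86 X86.User Asan

/-- **The bytes of every function of the image are in the reference state** (GENERATED: tools/mkfinal.py `allcode`, from
c/FUNCTIONS_f.txt; the field of a function is its unit id with `_` for punctuation). -/
structure AllCode (Lay : Layout) (u₀ : State) : Prop where
  /-- the bytes of `_start_vorbis` -/
  start_vorbis : HasCodeNat Lay u₀ Vorbis.L._start_vorbis.entry Vorbis.Code.code__start_vorbis.nat Vorbis.L._start_vorbis.size
  /-- the bytes of `__asan_report` -/
  asan_report : HasCodeNat Lay u₀ Vorbis.L.__asan_report.entry Vorbis.Code.code___asan_report.nat Vorbis.L.__asan_report.size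
  /-- the bytes of `range_bad` -/
  range_bad : HasCodeNat Lay u₀ Vorbis.L.range_bad.entry Vorbis.Code.code_range_bad.nat Vorbis.L.range_bad.size
  /-- the bytes of `__asan_load1_noabort` -/
  asan_load1_noabort : HasCodeNat Lay u₀ Vorbis.L.__asan_load1_noabort.entry Vorbis.Code.code___asan_load1_noabort.nat Vorbis.L.__asan_load1_noabort.size
  /-- the bytes of `__asan_store1_noabort` -/
  asan_store1_noabort : HasCodeNat Lay u₀ Vorbis.L.__asan_store1_noabort.entry Vorbis.Code.code___asan_store1_noabort.nat Vorbis.L.__asan_store1_noabort.size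
  /-- the bytes of `__asan_load2_noabort` -/
  asan_load2_noabort : HasCodeNat Lay u₀ Vorbis.L.__asan_load2_noabort.entry Vorbis.Code.code___asan_load2_noabort.nat Vorbis.L.__asan_load2_noabort.size
  /-- the bytes of `__asan_store2_noabort` -/
  asan_store2_noabort : HasCodeNat Lay u₀ Vorbis.L.__asan_store2_noabort.entry Vorbis.Code.code___asan_store2_noabort.nat Vorbis.L.__asan_store2_noabort.size
  /-- the bytes of `__asan_load4_noabort` -/
  asan_load4_noabort : HasCodeNat Lay u₀ Vorbis.L.__asan_load4_noabort.entry Vorbis.Code.code___asan_load4_noabort.nat Vorbis.L.__asan_load4_noabort.size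
  /-- the bytes of `__asan_store4_noabort` -/
  asan_store4_noabort : HasCodeNat Lay u₀ Vorbis.L.__asan_store4_noabort.entry Vorbis.Code.code___asan_store4_noabort.nat Vorbis.L.__asan_store4_noabort.size
  /-- the bytes of `__asan_load8_noabort` -/
  asan_load8_noabort : HasCodeNat Lay u₀ Vorbis.L.__asan_load8_noabort.entry Vorbis.Code.code___asan_load8_noabort.nat Vorbis.L.__asan_load8_noabort.size
  /-- the bytes of `__asan_store8_noabort` -/
  asan_store8_noabort : HasCodeNat Lay u₀ Vorbis.L.__asan_store8_noabort.entry Vorbis.Code.code___asan_store8_noabort.nat Vorbis.L.__asan_store8_noabort.size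
  /-- the bytes of `__asan_load16_noabort` -/
  asan_load16_noabort : HasCodeNat Lay u₀ Vorbis.L.__asan_load16_noabort.entry Vorbis.Code.code___asan_load16_noabort.nat Vorbis.L.__asan_load16_noabort.size
  /-- the bytes of `__asan_store16_noabort` -/
  asan_store16_noabort : HasCodeNat Lay u₀ Vorbis.L.__asan_store16_noabort.entry Vorbis.Code.code___asan_store16_noabort.nat Vorbis.L.__asan_store16_noabort.size
  /-- the bytes of `__asan_storeN_noabort` -/
  asan_storeN_noabort : HasCodeNat Lay u₀ Vorbis.L.__asan_storeN_noabort.entry Vorbis.Code.code___asan_storeN_noabort.nat Vorbis.L.__asan_storeN_noabort.size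
  /-- the bytes of `arena_unpoison` -/
  arena_unpoison : HasCodeNat Lay u₀ Vorbis.L.arena_unpoison.entry Vorbis.Code.code_arena_unpoison.nat Vorbis.L.arena_unpoison.size
  /-- the bytes of `arena_poison` -/
  arena_poison : HasCodeNat Lay u₀ Vorbis.L.arena_poison.entry Vorbis.Code.code_arena_poison.nat Vorbis.L.arena_poison.size
  /-- the bytes of `__asan_register_globals` -/
  asan_register_globals : HasCodeNat Lay u₀ Vorbis.L.__asan_register_globals.entry Vorbis.Code.code___asan_register_globals.nat Vorbis.L.__asan_register_globals.size
  /-- the bytes of `run_ctors` -/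
  run_ctors : HasCodeNat Lay u₀ Vorbis.L.run_ctors.entry Vorbis.Code.code_run_ctors.nat Vorbis.L.run_ctors.size
  /-- the bytes of `swap_bytes` -/
  swap_bytes : HasCodeNat Lay u₀ Vorbis.L.swap_bytes.entry Vorbis.Code.code_swap_bytes.nat Vorbis.L.swap_bytes.size
  /-- the bytes of `sift_down` -/
  sift_down : HasCodeNat Lay u₀ Vorbis.L.sift_down.entry Vorbis.Code.code_sift_down.nat Vorbis.L.sift_down.size
  /-- the bytes of `memcpy` -/
  memcpy : HasCodeNat Lay u₀ Vorbis.L.memcpy.entry Vorbis.Code.code_memcpy.nat Vorbis.L.memcpy.size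
  /-- the bytes of `memset` -/
  memset : HasCodeNat Lay u₀ Vorbis.L.memset.entry Vorbis.Code.code_memset.nat Vorbis.L.memset.size
  /-- the bytes of `memcmp` -/
  memcmp : HasCodeNat Lay u₀ Vorbis.L.memcmp.entry Vorbis.Code.code_memcmp.nat Vorbis.L.memcmp.size
  /-- the bytes of `abs` -/
  abs : HasCodeNat Lay u₀ Vorbis.L.abs.entry Vorbis.Code.code_abs.nat Vorbis.L.abs.size
  /-- the bytes of `malloc` -/
  malloc : HasCodeNat Lay u₀ Vorbis.L.malloc.entry Vorbis.Code.code_malloc.nat Vorbis.L.malloc.size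
  /-- the bytes of `free` -/
  free : HasCodeNat Lay u₀ Vorbis.L.free.entry Vorbis.Code.code_free.nat Vorbis.L.free.size
  /-- the bytes of `qsort` -/
  qsort : HasCodeNat Lay u₀ Vorbis.L.qsort.entry Vorbis.Code.code_qsort.nat Vorbis.L.qsort.size
  /-- the bytes of `two_to` -/
  two_to : HasCodeNat Lay u₀ Vorbis.L.two_to.entry Vorbis.Code.code_two_to.nat Vorbis.L.two_to.size
  /-- the bytes of `pow_int` -/
  pow_int : HasCodeNat Lay u₀ Vorbis.L.pow_int.entry Vorbis.Code.code_pow_int.nat Vorbis.L.pow_int.size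
  /-- the bytes of `sin_poly` -/
  sin_poly : HasCodeNat Lay u₀ Vorbis.L.sin_poly.entry Vorbis.Code.code_sin_poly.nat Vorbis.L.sin_poly.size
  /-- the bytes of `cos_poly` -/
  cos_poly : HasCodeNat Lay u₀ Vorbis.L.cos_poly.entry Vorbis.Code.code_cos_poly.nat Vorbis.L.cos_poly.size
  /-- the bytes of `ldexp` -/
  ldexp : HasCodeNat Lay u₀ Vorbis.L.ldexp.entry Vorbis.Code.code_ldexp.nat Vorbis.L.ldexp.size
  /-- the bytes of `floor` -/
  floor : HasCodeNat Lay u₀ Vorbis.L.floor.entry Vorbis.Code.code_floor.nat Vorbis.L.floor.size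
  /-- the bytes of `sincos_quadrant` -/
  sincos_quadrant : HasCodeNat Lay u₀ Vorbis.L.sincos_quadrant.entry Vorbis.Code.code_sincos_quadrant.nat Vorbis.L.sincos_quadrant.size
  /-- the bytes of `exp` -/
  exp : HasCodeNat Lay u₀ Vorbis.L.exp.entry Vorbis.Code.code_exp.nat Vorbis.L.exp.size
  /-- the bytes of `log` -/
  log : HasCodeNat Lay u₀ Vorbis.L.log.entry Vorbis.Code.code_log.nat Vorbis.L.log.size
  /-- the bytes of `pow` -/
  pow : HasCodeNat Lay u₀ Vorbis.L.pow.entry Vorbis.Code.code_pow.nat Vorbis.L.pow.size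
  /-- the bytes of `sin` -/
  sin : HasCodeNat Lay u₀ Vorbis.L.sin.entry Vorbis.Code.code_sin.nat Vorbis.L.sin.size
  /-- the bytes of `cos` -/
  cos : HasCodeNat Lay u₀ Vorbis.L.cos.entry Vorbis.Code.code_cos.nat Vorbis.L.cos.size
  /-- the bytes of `copy_frame` -/
  copy_frame : HasCodeNat Lay u₀ Vorbis.L.copy_frame.entry Vorbis.Code.code_copy_frame.nat Vorbis.L.copy_frame.size
  /-- the bytes of `put_header` -/
  put_header : HasCodeNat Lay u₀ Vorbis.L.put_header.entry Vorbis.Code.code_put_header.nat Vorbis.L.put_header.size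
  /-- the bytes of `decode_all` -/
  decode_all : HasCodeNat Lay u₀ Vorbis.L.decode_all.entry Vorbis.Code.code_decode_all.nat Vorbis.L.decode_all.size
  /-- the bytes of `_sub_I_65535_1` -/
  sub_I_65535_1 : HasCodeNat Lay u₀ Vorbis.L._sub_I_65535_1.entry Vorbis.Code.code__sub_I_65535_1.nat Vorbis.L._sub_I_65535_1.size
  /-- the bytes of `error` -/
  error : HasCodeNat Lay u₀ Vorbis.L.error.entry Vorbis.Code.code_error.nat Vorbis.L.error.size
  /-- the bytes of `make_block_array` -/
  make_block_array : HasCodeNat Lay u₀ Vorbis.L.make_block_array.entry Vorbis.Code.code_make_block_array.nat Vorbis.L.make_block_array.size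
  /-- the bytes of `crc32_init` -/
  crc32_init : HasCodeNat Lay u₀ Vorbis.L.crc32_init.entry Vorbis.Code.code_crc32_init.nat Vorbis.L.crc32_init.size
  /-- the bytes of `bit_reverse` -/
  bit_reverse : HasCodeNat Lay u₀ Vorbis.L.bit_reverse.entry Vorbis.Code.code_bit_reverse.nat Vorbis.L.bit_reverse.size
  /-- the bytes of `square` -/
  square : HasCodeNat Lay u₀ Vorbis.L.square.entry Vorbis.Code.code_square.nat Vorbis.L.square.size
  /-- the bytes of `ilog` -/
  ilog : HasCodeNat Lay u₀ Vorbis.L.ilog.entry Vorbis.Code.code_ilog.nat Vorbis.L.ilog.size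
  /-- the bytes of `add_entry` -/
  add_entry : HasCodeNat Lay u₀ Vorbis.L.add_entry.entry Vorbis.Code.code_add_entry.nat Vorbis.L.add_entry.size
  /-- the bytes of `compute_accelerated_huffman` -/
  compute_accelerated_huffman : HasCodeNat Lay u₀ Vorbis.L.compute_accelerated_huffman.entry Vorbis.Code.code_compute_accelerated_huffman.nat Vorbis.L.compute_accelerated_huffman.size
  /-- the bytes of `uint32_compare` -/
  uint32_compare : HasCodeNat Lay u₀ Vorbis.L.uint32_compare.entry Vorbis.Code.code_uint32_compare.nat Vorbis.L.uint32_compare.size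
  /-- the bytes of `include_in_sort` -/
  include_in_sort : HasCodeNat Lay u₀ Vorbis.L.include_in_sort.entry Vorbis.Code.code_include_in_sort.nat Vorbis.L.include_in_sort.size
  /-- the bytes of `compute_bitreverse` -/
  compute_bitreverse : HasCodeNat Lay u₀ Vorbis.L.compute_bitreverse.entry Vorbis.Code.code_compute_bitreverse.nat Vorbis.L.compute_bitreverse.size
  /-- the bytes of `neighbors` -/
  neighbors : HasCodeNat Lay u₀ Vorbis.L.neighbors.entry Vorbis.Code.code_neighbors.nat Vorbis.L.neighbors.size
  /-- the bytes of `point_compare` -/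
  point_compare : HasCodeNat Lay u₀ Vorbis.L.point_compare.entry Vorbis.Code.code_point_compare.nat Vorbis.L.point_compare.size
  /-- the bytes of `get8` -/
  get8 : HasCodeNat Lay u₀ Vorbis.L.get8.entry Vorbis.Code.code_get8.nat Vorbis.L.get8.size
  /-- the bytes of `get32` -/
  get32 : HasCodeNat Lay u₀ Vorbis.L.get32.entry Vorbis.Code.code_get32.nat Vorbis.L.get32.size
  /-- the bytes of `skip` -/
  skip : HasCodeNat Lay u₀ Vorbis.L.skip.entry Vorbis.Code.code_skip.nat Vorbis.L.skip.size
  /-- the bytes of `capture_pattern` -/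
  capture_pattern : HasCodeNat Lay u₀ Vorbis.L.capture_pattern.entry Vorbis.Code.code_capture_pattern.nat Vorbis.L.capture_pattern.size
  /-- the bytes of `imdct_step3_iter0_loop` -/
  imdct_step3_iter0_loop : HasCodeNat Lay u₀ Vorbis.L.imdct_step3_iter0_loop.entry Vorbis.Code.code_imdct_step3_iter0_loop.nat Vorbis.L.imdct_step3_iter0_loop.size
  /-- the bytes of `imdct_step3_inner_r_loop` -/
  imdct_step3_inner_r_loop : HasCodeNat Lay u₀ Vorbis.L.imdct_step3_inner_r_loop.entry Vorbis.Code.code_imdct_step3_inner_r_loop.nat Vorbis.L.imdct_step3_inner_r_loop.size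
  /-- the bytes of `imdct_step3_inner_s_loop` -/
  imdct_step3_inner_s_loop : HasCodeNat Lay u₀ Vorbis.L.imdct_step3_inner_s_loop.entry Vorbis.Code.code_imdct_step3_inner_s_loop.nat Vorbis.L.imdct_step3_inner_s_loop.size
  /-- the bytes of `iter_54` -/
  iter_54 : HasCodeNat Lay u₀ Vorbis.L.iter_54.entry Vorbis.Code.code_iter_54.nat Vorbis.L.iter_54.size
  /-- the bytes of `imdct_step3_inner_s_loop_ld654` -/
  imdct_step3_inner_s_loop_ld654 : HasCodeNat Lay u₀ Vorbis.L.imdct_step3_inner_s_loop_ld654.entry Vorbis.Code.code_imdct_step3_inner_s_loop_ld654.nat Vorbis.L.imdct_step3_inner_s_loop_ld654.size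
  /-- the bytes of `get_window` -/
  get_window : HasCodeNat Lay u₀ Vorbis.L.get_window.entry Vorbis.Code.code_get_window.nat Vorbis.L.get_window.size
  /-- the bytes of `vorbis_finish_frame` -/
  vorbis_finish_frame : HasCodeNat Lay u₀ Vorbis.L.vorbis_finish_frame.entry Vorbis.Code.code_vorbis_finish_frame.nat Vorbis.L.vorbis_finish_frame.size
  /-- the bytes of `setup_free` -/
  setup_free : HasCodeNat Lay u₀ Vorbis.L.setup_free.entry Vorbis.Code.code_setup_free.nat Vorbis.L.setup_free.size
  /-- the bytes of `vorbis_deinit` -/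
  vorbis_deinit : HasCodeNat Lay u₀ Vorbis.L.vorbis_deinit.entry Vorbis.Code.code_vorbis_deinit.nat Vorbis.L.vorbis_deinit.size
  /-- the bytes of `getn` -/
  getn : HasCodeNat Lay u₀ Vorbis.L.getn.entry Vorbis.Code.code_getn.nat Vorbis.L.getn.size
  /-- the bytes of `vorbis_init` -/
  vorbis_init : HasCodeNat Lay u₀ Vorbis.L.vorbis_init.entry Vorbis.Code.code_vorbis_init.nat Vorbis.L.vorbis_init.size
  /-- the bytes of `compute_codewords` -/
  compute_codewords : HasCodeNat Lay u₀ Vorbis.L.compute_codewords.entry Vorbis.Code.code_compute_codewords.nat Vorbis.L.compute_codewords.size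
  /-- the bytes of `predict_point` -/
  predict_point : HasCodeNat Lay u₀ Vorbis.L.predict_point.entry Vorbis.Code.code_predict_point.nat Vorbis.L.predict_point.size
  /-- the bytes of `draw_line` -/
  draw_line : HasCodeNat Lay u₀ Vorbis.L.draw_line.entry Vorbis.Code.code_draw_line.nat Vorbis.L.draw_line.size
  /-- the bytes of `do_floor` -/
  do_floor : HasCodeNat Lay u₀ Vorbis.L.do_floor.entry Vorbis.Code.code_do_floor.nat Vorbis.L.do_floor.size
  /-- the bytes of `setup_temp_malloc` -/
  setup_temp_malloc : HasCodeNat Lay u₀ Vorbis.L.setup_temp_malloc.entry Vorbis.Code.code_setup_temp_malloc.nat Vorbis.L.setup_temp_malloc.size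
  /-- the bytes of `setup_malloc` -/
  setup_malloc : HasCodeNat Lay u₀ Vorbis.L.setup_malloc.entry Vorbis.Code.code_setup_malloc.nat Vorbis.L.setup_malloc.size
  /-- the bytes of `vorbis_alloc` -/
  vorbis_alloc : HasCodeNat Lay u₀ Vorbis.L.vorbis_alloc.entry Vorbis.Code.code_vorbis_alloc.nat Vorbis.L.vorbis_alloc.size
  /-- the bytes of `arena_temp_restore` -/
  arena_temp_restore : HasCodeNat Lay u₀ Vorbis.L.arena_temp_restore.entry Vorbis.Code.code_arena_temp_restore.nat Vorbis.L.arena_temp_restore.size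
  /-- the bytes of `inverse_mdct` -/
  inverse_mdct : HasCodeNat Lay u₀ Vorbis.L.inverse_mdct.entry Vorbis.Code.code_inverse_mdct.nat Vorbis.L.inverse_mdct.size
  /-- the bytes of `setup_temp_free` -/
  setup_temp_free : HasCodeNat Lay u₀ Vorbis.L.setup_temp_free.entry Vorbis.Code.code_setup_temp_free.nat Vorbis.L.setup_temp_free.size
  /-- the bytes of `compute_sorted_huffman` -/
  compute_sorted_huffman : HasCodeNat Lay u₀ Vorbis.L.compute_sorted_huffman.entry Vorbis.Code.code_compute_sorted_huffman.nat Vorbis.L.compute_sorted_huffman.size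
  /-- the bytes of `vorbis_validate` -/
  vorbis_validate : HasCodeNat Lay u₀ Vorbis.L.vorbis_validate.entry Vorbis.Code.code_vorbis_validate.nat Vorbis.L.vorbis_validate.size
  /-- the bytes of `float32_unpack` -/
  float32_unpack : HasCodeNat Lay u₀ Vorbis.L.float32_unpack.entry Vorbis.Code.code_float32_unpack.nat Vorbis.L.float32_unpack.size
  /-- the bytes of `lookup1_values` -/
  lookup1_values : HasCodeNat Lay u₀ Vorbis.L.lookup1_values.entry Vorbis.Code.code_lookup1_values.nat Vorbis.L.lookup1_values.size
  /-- the bytes of `compute_twiddle_factors` -/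
  compute_twiddle_factors : HasCodeNat Lay u₀ Vorbis.L.compute_twiddle_factors.entry Vorbis.Code.code_compute_twiddle_factors.nat Vorbis.L.compute_twiddle_factors.size
  /-- the bytes of `compute_window` -/
  compute_window : HasCodeNat Lay u₀ Vorbis.L.compute_window.entry Vorbis.Code.code_compute_window.nat Vorbis.L.compute_window.size
  /-- the bytes of `init_blocksize` -/
  init_blocksize : HasCodeNat Lay u₀ Vorbis.L.init_blocksize.entry Vorbis.Code.code_init_blocksize.nat Vorbis.L.init_blocksize.size
  /-- the bytes of `stb_vorbis_close` -/
  stb_vorbis_close : HasCodeNat Lay u₀ Vorbis.L.stb_vorbis_close.entry Vorbis.Code.code_stb_vorbis_close.nat Vorbis.L.stb_vorbis_close.size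
  /-- the bytes of `stb_vorbis_get_error` -/
  stb_vorbis_get_error : HasCodeNat Lay u₀ Vorbis.L.stb_vorbis_get_error.entry Vorbis.Code.code_stb_vorbis_get_error.nat Vorbis.L.stb_vorbis_get_error.size
  /-- the bytes of `stb_vorbis_get_file_offset` -/
  stb_vorbis_get_file_offset : HasCodeNat Lay u₀ Vorbis.L.stb_vorbis_get_file_offset.entry Vorbis.Code.code_stb_vorbis_get_file_offset.nat Vorbis.L.stb_vorbis_get_file_offset.size
  /-- the bytes of `start_page_no_capturepattern` -/
  start_page_no_capturepattern : HasCodeNat Lay u₀ Vorbis.L.start_page_no_capturepattern.entry Vorbis.Code.code_start_page_no_capturepattern.nat Vorbis.L.start_page_no_capturepattern.size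
  /-- the bytes of `start_page` -/
  start_page : HasCodeNat Lay u₀ Vorbis.L.start_page.entry Vorbis.Code.code_start_page.nat Vorbis.L.start_page.size
  /-- the bytes of `next_segment` -/
  next_segment : HasCodeNat Lay u₀ Vorbis.L.next_segment.entry Vorbis.Code.code_next_segment.nat Vorbis.L.next_segment.size
  /-- the bytes of `get8_packet_raw` -/
  get8_packet_raw : HasCodeNat Lay u₀ Vorbis.L.get8_packet_raw.entry Vorbis.Code.code_get8_packet_raw.nat Vorbis.L.get8_packet_raw.size
  /-- the bytes of `get8_packet` -/
  get8_packet : HasCodeNat Lay u₀ Vorbis.L.get8_packet.entry Vorbis.Code.code_get8_packet.nat Vorbis.L.get8_packet.size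
  /-- the bytes of `get32_packet` -/
  get32_packet : HasCodeNat Lay u₀ Vorbis.L.get32_packet.entry Vorbis.Code.code_get32_packet.nat Vorbis.L.get32_packet.size
  /-- the bytes of `get_bits` -/
  get_bits : HasCodeNat Lay u₀ Vorbis.L.get_bits.entry Vorbis.Code.code_get_bits.nat Vorbis.L.get_bits.size
  /-- the bytes of `prep_huffman` -/
  prep_huffman : HasCodeNat Lay u₀ Vorbis.L.prep_huffman.entry Vorbis.Code.code_prep_huffman.nat Vorbis.L.prep_huffman.size
  /-- the bytes of `codebook_decode_scalar_raw` -/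
  codebook_decode_scalar_raw : HasCodeNat Lay u₀ Vorbis.L.codebook_decode_scalar_raw.entry Vorbis.Code.code_codebook_decode_scalar_raw.nat Vorbis.L.codebook_decode_scalar_raw.size
  /-- the bytes of `codebook_decode_deinterleave_repeat` -/
  codebook_decode_deinterleave_repeat : HasCodeNat Lay u₀ Vorbis.L.codebook_decode_deinterleave_repeat.entry Vorbis.Code.code_codebook_decode_deinterleave_repeat.nat Vorbis.L.codebook_decode_deinterleave_repeat.size
  /-- the bytes of `codebook_decode_start` -/
  codebook_decode_start : HasCodeNat Lay u₀ Vorbis.L.codebook_decode_start.entry Vorbis.Code.code_codebook_decode_start.nat Vorbis.L.codebook_decode_start.size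
  /-- the bytes of `codebook_decode_step` -/
  codebook_decode_step : HasCodeNat Lay u₀ Vorbis.L.codebook_decode_step.entry Vorbis.Code.code_codebook_decode_step.nat Vorbis.L.codebook_decode_step.size
  /-- the bytes of `codebook_decode` -/
  codebook_decode : HasCodeNat Lay u₀ Vorbis.L.codebook_decode.entry Vorbis.Code.code_codebook_decode.nat Vorbis.L.codebook_decode.size
  /-- the bytes of `residue_decode` -/
  residue_decode : HasCodeNat Lay u₀ Vorbis.L.residue_decode.entry Vorbis.Code.code_residue_decode.nat Vorbis.L.residue_decode.size
  /-- the bytes of `decode_residue` -/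
  decode_residue : HasCodeNat Lay u₀ Vorbis.L.decode_residue.entry Vorbis.Code.code_decode_residue.nat Vorbis.L.decode_residue.size
  /-- the bytes of `flush_packet` -/
  flush_packet : HasCodeNat Lay u₀ Vorbis.L.flush_packet.entry Vorbis.Code.code_flush_packet.nat Vorbis.L.flush_packet.size
  /-- the bytes of `vorbis_decode_packet_rest` -/
  vorbis_decode_packet_rest : HasCodeNat Lay u₀ Vorbis.L.vorbis_decode_packet_rest.entry Vorbis.Code.code_vorbis_decode_packet_rest.nat Vorbis.L.vorbis_decode_packet_rest.size
  /-- the bytes of `start_packet` -/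
  start_packet : HasCodeNat Lay u₀ Vorbis.L.start_packet.entry Vorbis.Code.code_start_packet.nat Vorbis.L.start_packet.size
  /-- the bytes of `maybe_start_packet` -/
  maybe_start_packet : HasCodeNat Lay u₀ Vorbis.L.maybe_start_packet.entry Vorbis.Code.code_maybe_start_packet.nat Vorbis.L.maybe_start_packet.size
  /-- the bytes of `vorbis_decode_initial` -/
  vorbis_decode_initial : HasCodeNat Lay u₀ Vorbis.L.vorbis_decode_initial.entry Vorbis.Code.code_vorbis_decode_initial.nat Vorbis.L.vorbis_decode_initial.size
  /-- the bytes of `vorbis_decode_packet` -/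
  vorbis_decode_packet : HasCodeNat Lay u₀ Vorbis.L.vorbis_decode_packet.entry Vorbis.Code.code_vorbis_decode_packet.nat Vorbis.L.vorbis_decode_packet.size
  /-- the bytes of `vorbis_pump_first_frame` -/
  vorbis_pump_first_frame : HasCodeNat Lay u₀ Vorbis.L.vorbis_pump_first_frame.entry Vorbis.Code.code_vorbis_pump_first_frame.nat Vorbis.L.vorbis_pump_first_frame.size
  /-- the bytes of `start_decoder` -/
  start_decoder : HasCodeNat Lay u₀ Vorbis.L.start_decoder.entry Vorbis.Code.code_start_decoder.nat Vorbis.L.start_decoder.size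
  /-- the bytes of `stb_vorbis_get_frame_float` -/
  stb_vorbis_get_frame_float : HasCodeNat Lay u₀ Vorbis.L.stb_vorbis_get_frame_float.entry Vorbis.Code.code_stb_vorbis_get_frame_float.nat Vorbis.L.stb_vorbis_get_frame_float.size
  /-- the bytes of `stb_vorbis_open_memory` -/
  stb_vorbis_open_memory : HasCodeNat Lay u₀ Vorbis.L.stb_vorbis_open_memory.entry Vorbis.Code.code_stb_vorbis_open_memory.nat Vorbis.L.stb_vorbis_open_memory.size

namespace Final

/-- **What the composition needs to know about the file `bytes`** (vorbis_f.bin). Every clause is a closed fact about the byte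
array once it is written out: `code` from `start_text` and the `spec` theorems of `#code_bytes` (Vorbis/Code.lean: the text is the
concatenation of the functions' bytes at their link addresses), the other three from `start_image` (the image's `.init_array`,
`.data..LASAN0` and `.rodata`). DISCHARGED for the literal image of the build: `Final.imageFacts_v5 : ImageFacts Vorbis.imageV5`
(Vorbis/Spec/FinalImage.lean; the 137,536 bytes of c/vorbis_f.bin: Vorbis/ImageV5.lean). -/
structure ImageFacts (bytes : Array UInt8) : Prop where
  ok : (Vorbis.symbols.image bytes).OK
  code : ∀ (c : Nat) (hc : c = 0 ∨ c = 3) (inp : List UInt8),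
    AllCode (startLayout c hc) (startU (Vorbis.symbols.image bytes) c inp)
  ctor : ∀ (c : Nat) (inp : List UInt8), CtorIn (startU (Vorbis.symbols.image bytes) c inp).mem rt.sym
  descs : ∀ (c : Nat) (inp : List UInt8), DescsIn (startU (Vorbis.symbols.image bytes) c inp).mem rt.table rt.descs
  consts : ∀ (c : Nat) (inp : List UInt8), Consts (startU (Vorbis.symbols.image bytes) c inp).mem

/-- **THE END THEOREM, as a proposition**: for the image whose bytes are `bytes`, whatever the input, on every processor the proof
covers, at ring 0 and at ring 3, the run from the start machine reaches `vorbis_exit`, and after every step before that RIP is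
inside the image's code and not at `__asan_report`. -/
def Statement : Prop :=
  ∀ bytes : Array UInt8, ImageFacts bytes → Vorbis.VorbisStaysInCode (Vorbis.symbols.image bytes)

/-- **The contracts of the stub's two callees, with no hypothesis left**: what the bottom-up composition of the 240 units ends in. -/
def ClosedTop (Lay : Layout) (μ : Microarch) (u₀ : State) : Prop :=
  Calls Lay μ WayInv (conv u₀) L.run_ctors.entry (Asan.runCtorsSpec rt) ∧
  ∀ (others : List Obj) (frames : List (Nat × FrameLayout)) (len : Nat),
    Calls Lay μ WayInv (conv u₀) L.decode_all.entry (decode_all.spec others frames len)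

/-! ### The part of the composition that does not depend on the units -/

/-- The image of this build, for the file bytes `bytes`. -/
abbrev im (bytes : Array UInt8) : Image := Vorbis.symbols.image bytes

/-- **The shadow layer after `run_ctors`, for any memory `mem₁` with the start state's shadow** (`registered_shadowInv` of
Vorbis/StartShadow.lean is the instance `mem₁ = mem₀`; run_ctors is entered after the `call` pushed a return address, and
`registerMem` depends on the shadow bytes only through the memory it starts from). -/
theorem registered (imv : Image) (him : imv.OK) (c : Nat) (hc : c = 0 ∨ c = 3) (inp : List UInt8)
    (hlen : inp.length ≤ 0x1FF000) (mem₁ mem' : Mem) (h1 : Mem.EqOn 0xC00000 0xE00000 (startU imv c inp).mem mem₁)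
    (he : Mem.EqOn 0xC00000 0xE00000 (registerMem mem₁ Vorbis.Globals.descs) mem')
    (himg : ∀ d, d ∈ Vorbis.Globals.descs → d.beg + d.sizeRz ≤ (imv.imageEnd + 7) / 8 * 8) :
    ShadowInv (Vorbis.Globals.objs ++ initialObjs inp.length) [] 0x800000 mem' := by
  have hend := him.end_le
  have h0 : ShadowInv (initialObjs inp.length) [] 0x800000 mem₁ :=
    (start_shadowInv imv him c hc inp hlen).untouched h1
  refine ShadowInv.untouched ?_ he
  refine h0.register Vorbis.Globals.descs Vorbis.Globals.descs_ok ?_ Vorbis.Globals.descs_apart ?_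
  · intro d hd
    obtain ⟨d1, d2, d3, d4, d5⟩ := Vorbis.Globals.descs_ok d hd
    have hclean := (start_imageClean imv him c hc inp).mono d4 (himg d hd)
    exact hclean.eqOn (by omega) h1
  · intro d hd o ho
    obtain ⟨d1, d2, d3, d4, d5⟩ := Vorbis.Globals.descs_ok d hd
    unfold initialObjs at ho
    simp only [List.mem_cons, List.not_mem_nil, or_false] at ho
    unfold GlobalDesc.Off Obj.gLo Obj.gHi
    rcases ho with rfl | rfl
    · unfold objIN
      simp only
      omega
    · unfold objOUT
      simp only
      omega

/-- The slots of the six globals lie inside the image (`__image_end` = 122040H). -/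
theorem descs_in_image : ∀ d, d ∈ Vorbis.Globals.descs →
    d.beg + d.sizeRz ≤ ((Vorbis.symbols.image_end) + 7) / 8 * 8 := by
  decide

/-- **The start state satisfies `Top.StartOK`**: the facts of Vorbis/Start.lean and Vorbis/StartShadow.lean about `startU`, and
the three data facts of `ImageFacts`. -/
theorem startOK (bytes : Array UInt8) (hb : ImageFacts bytes) (c : Nat) (hc : c = 0 ∨ c = 3) (inp : List UInt8)
    (hfit : inp.length ≤ 0x1FF000) : Top.StartOK inp.length (startU (im bytes) c inp) where
  rip := start_rip (im bytes) c inp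
  rsp := by
    rw [start_reg]
    rfl
  inv := ⟨start_df (im bytes) c inp, start_sse_masks (im bytes) c inp⟩
  len_le := hfit
  param_in := start_param (im bytes) c hc inp hfit 0 (by omega)
  param_len := start_param (im bytes) c hc inp hfit 1 (by omega)
  param_out := start_param (im bytes) c hc inp hfit 2 (by omega)
  param_cap := start_param (im bytes) c hc inp hfit 3 (by omega)
  param_arena := start_param (im bytes) c hc inp hfit 6 (by omega)
  param_arena_len := start_param (im bytes) c hc inp hfit 7 (by omega)
  ctor := hb.ctor c inp
  descs := hb.descs c inp
  registered := fun mem₁ mem' h1 he =>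
    registered (im bytes) hb.ok c hc inp hfit mem₁ mem' h1 he descs_in_image
  consts := hb.consts c inp

/-- **FROM THE STUB AND THE TWO CLOSED CONTRACTS TO THE END THEOREM.** `u₀` := the start state (`CodeOK u₀ u₀.mem` by reflexivity),
`Lay` := the start layout (`startLayout_hi`), the code of every function from `ImageFacts.code`; the invariant of the way is the one
`VorbisStaysInCode.of_reachVia` asks for (`wayInv_iff`: by `Iff.rfl`). -/
theorem of_top (hstub : start_vorbis.Statement)
    (hclosed : ∀ (Lay : Layout) (_ : Lay.hi = 0x1000000) (μ : Microarch) (_ : UserX.MicroOK μ) (u₀ : State),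
      AllCode Lay u₀ → ClosedTop Lay μ u₀) : Statement := by
  intro bytes hb
  apply VorbisStaysInCode.of_reachVia
  intro μ hμ c hc inp hfit
  have hLay := startLayout_hi c hc
  have hcode := hb.code c hc inp
  obtain ⟨hrc, hda⟩ := hclosed (startLayout c hc) hLay μ hμ (startU (im bytes) c inp) hcode
  exact hstub (startLayout c hc) hLay μ hμ (startU (im bytes) c inp) hcode.start_vorbis hrc hda inp.length
    (startU (im bytes) c inp) (startOK bytes hb c hc inp hfit) (Mem.EqOn.refl _ _ _)

end Final

end Vorbis.Spec

/-
  THE BOTTOM-UP ORDER OF THE COMPOSITION (GENERATED by tools/mkfinal.py `order` from design/units.tsv: a topological order of its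
  `callee_units` column, ties in file order = the order of c/CALLGRAPH.txt). One line per unit: number, unit id, kind, the units
  whose theorems are its arguments (`have h_<unit> := <unit>_ok Lay hLay μ hμ u₀ hcode.<function> h_<needed₁> …`; tools/mkfinal.py
  `script` prints these lines). Not in design/units.tsv: S2's stage-1 unit `get_bits.24` (before `get_bits`, which takes it as its
  hypothesis about the recursive calls; no other unit cites it). `__asan_report` is listed by units.tsv but has NO unit. The
  COMPOSITION unit of a segmented function provides the contract its callers cite.

   1  __asan_register_globals                      whole function  needs: -
   2  _sub_I_65535_1                               whole function  needs: __asan_register_globals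
   3  run_ctors                                    whole function  needs: _sub_I_65535_1   [INDIRECT call]
   4  __asan_report                                NO UNIT          never called in a proved run: `rip ≠ L.report` at every step IS `WayInv`
   5  __asan_load4_noabort                         whole function  needs: -
   6  __asan_store4_noabort                        whole function  needs: -
   7  __asan_load8_noabort                         whole function  needs: -
   8  copy_frame                                   whole function  needs: __asan_load8_noabort, __asan_load4_noabort, __asan_store4_noabort
   9  put_header                                   whole function  needs: __asan_store4_noabort
  10  free                                         whole function  needs: -
  11  setup_free                                   whole function  needs: __asan_load8_noabort, free
  12  __asan_load1_noabort                         whole function  needs: -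
  13  vorbis_deinit.1                              segment         needs: __asan_load8_noabort, setup_free, __asan_load4_noabort, __asan_load1_noabort
  14  vorbis_deinit.2                              segment         needs: __asan_load8_noabort, setup_free, __asan_load4_noabort
  15  vorbis_deinit.3                              segment         needs: __asan_load8_noabort, setup_free, __asan_load4_noabort
  16  vorbis_deinit.4                              segment         needs: -
  17  vorbis_deinit.COMPOSITION                    COMPOSITION     needs: vorbis_deinit.1, vorbis_deinit.2, vorbis_deinit.3, vorbis_deinit.4
  18  stb_vorbis_close                             whole function  needs: vorbis_deinit.COMPOSITION, setup_free
  19  stb_vorbis_get_error                         whole function  needs: __asan_load4_noabort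
  20  __asan_store8_noabort                        whole function  needs: -
  21  get_window                                   whole function  needs: __asan_load4_noabort, __asan_load8_noabort
  22  vorbis_finish_frame                          whole function  needs: __asan_load4_noabort, get_window, __asan_load8_noabort, __asan_store4_noabort
  23  __asan_store1_noabort                        whole function  needs: -
  24  __asan_load2_noabort                         whole function  needs: -
  25  __asan_store2_noabort                        whole function  needs: -
  26  memcpy                                       whole function  needs: __asan_load1_noabort, __asan_store1_noabort
  27  memset                                       whole function  needs: __asan_store1_noabort
  28  error                                        whole function  needs: __asan_store4_noabort
  29  ilog                                         whole function  needs: __asan_load1_noabort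
  30  abs                                          whole function  needs: -
  31  predict_point                                whole function  needs: abs
  32  draw_line                                    whole function  needs: abs, __asan_load4_noabort
  33  do_floor                                     whole function  needs: __asan_load8_noabort, __asan_load1_noabort, __asan_load2_noabort, error, draw_line, __asan_load4_noabort
  34  imdct_step3_iter0_loop.1                     segment         needs: -
  35  imdct_step3_iter0_loop.2                     segment         needs: __asan_load4_noabort
  36  imdct_step3_iter0_loop.3                     segment         needs: __asan_load4_noabort
  37  imdct_step3_iter0_loop.4                     segment         needs: -
  38  imdct_step3_iter0_loop.COMPOSITION           COMPOSITION     needs: imdct_step3_iter0_loop.1, imdct_step3_iter0_loop.2, imdct_step3_iter0_loop.3, imdct_step3_iter0_loop.4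
  39  imdct_step3_inner_r_loop.1                   segment         needs: -
  40  imdct_step3_inner_r_loop.2                   segment         needs: __asan_load4_noabort
  41  imdct_step3_inner_r_loop.3                   segment         needs: __asan_load4_noabort
  42  imdct_step3_inner_r_loop.4                   segment         needs: -
  43  imdct_step3_inner_r_loop.COMPOSITION         COMPOSITION     needs: imdct_step3_inner_r_loop.1, imdct_step3_inner_r_loop.2, imdct_step3_inner_r_loop.3, imdct_step3_inner_r_loop.4
  44  imdct_step3_inner_s_loop.1                   segment         needs: __asan_load4_noabort
  45  imdct_step3_inner_s_loop.2                   segment         needs: __asan_load4_noabort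
  46  imdct_step3_inner_s_loop.3                   segment         needs: -
  47  imdct_step3_inner_s_loop.COMPOSITION         COMPOSITION     needs: imdct_step3_inner_s_loop.1, imdct_step3_inner_s_loop.2, imdct_step3_inner_s_loop.3
  48  iter_54                                      whole function  needs: __asan_load4_noabort
  49  imdct_step3_inner_s_loop_ld654.1             segment         needs: __asan_load4_noabort
  50  imdct_step3_inner_s_loop_ld654.2             segment         needs: __asan_load4_noabort, iter_54
  51  imdct_step3_inner_s_loop_ld654.3             segment         needs: -
  52  imdct_step3_inner_s_loop_ld654.COMPOSITION   COMPOSITION     needs: imdct_step3_inner_s_loop_ld654.1, imdct_step3_inner_s_loop_ld654.2, imdct_step3_inner_s_loop_ld654.3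
  53  arena_unpoison                               whole function  needs: -
  54  malloc                                       whole function  needs: -
  55  setup_temp_malloc                            whole function  needs: __asan_load8_noabort, __asan_load4_noabort, arena_unpoison, malloc
  56  arena_poison                                 whole function  needs: -
  57  arena_temp_restore                           whole function  needs: __asan_load8_noabort, __asan_load4_noabort, arena_poison, __asan_store4_noabort
  58  inverse_mdct.1                               segment         needs: __asan_load4_noabort, __asan_load8_noabort, setup_temp_malloc
  59  inverse_mdct.2                               segment         needs: __asan_load4_noabort, __asan_store4_noabort
  60  inverse_mdct.3                               segment         needs: __asan_load4_noabort, __asan_store4_noabort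
  61  inverse_mdct.4                               segment         needs: __asan_load4_noabort, __asan_store4_noabort
  62  inverse_mdct.5                               segment         needs: ilog, imdct_step3_iter0_loop.COMPOSITION, imdct_step3_inner_r_loop.COMPOSITION
  63  inverse_mdct.6                               segment         needs: imdct_step3_inner_r_loop.COMPOSITION
  64  inverse_mdct.7                               segment         needs: imdct_step3_inner_s_loop.COMPOSITION, imdct_step3_inner_s_loop_ld654.COMPOSITION, __asan_load8_noabort
  65  inverse_mdct.8                               segment         needs: __asan_load2_noabort, __asan_load4_noabort, __asan_store4_noabort, __asan_load8_noabort
  66  inverse_mdct.9                               segment         needs: __asan_load4_noabort, __asan_load8_noabort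
  67  inverse_mdct.10                              segment         needs: __asan_load4_noabort, __asan_store4_noabort
  68  inverse_mdct.11                              segment         needs: __asan_load4_noabort, __asan_store4_noabort
  69  inverse_mdct.12                              segment         needs: arena_temp_restore
  70  inverse_mdct.COMPOSITION                     COMPOSITION     needs: inverse_mdct.1, inverse_mdct.2, inverse_mdct.3, inverse_mdct.4, inverse_mdct.5, inverse_mdct.6, inverse_mdct.7, inverse_mdct.8, inverse_mdct.9, inverse_mdct.10, inverse_mdct.11, inverse_mdct.12
  71  get8                                         whole function  needs: __asan_load8_noabort, __asan_store4_noabort, __asan_load1_noabort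
  72  capture_pattern                              whole function  needs: get8
  73  get32                                        whole function  needs: get8
  74  getn                                         whole function  needs: __asan_load8_noabort, __asan_store4_noabort, memcpy
  75  stb_vorbis_get_file_offset                   whole function  needs: __asan_load8_noabort
  76  start_page_no_capturepattern                 whole function  needs: __asan_load1_noabort, stb_vorbis_get_file_offset, __asan_store4_noabort, get8, __asan_store1_noabort, get32, getn, __asan_load4_noabort, error
  77  start_page                                   whole function  needs: capture_pattern, start_page_no_capturepattern, error
  78  next_segment                                 whole function  needs: __asan_load4_noabort, __asan_load1_noabort, __asan_store4_noabort, __asan_store1_noabort, start_page, error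
  79  get8_packet_raw                              whole function  needs: __asan_load1_noabort, __asan_load4_noabort, next_segment, get8
      get_bits.24                                  whole function  needs: __asan_load4_noabort, __asan_store4_noabort, get8_packet_raw   [S2's stage-1 unit: `spec24`, n ≤ 24, no recursion]
  80  get_bits                                     whole function  needs: __asan_load4_noabort, __asan_store4_noabort, get8_packet_raw, get_bits.24   [recursive: its own calls by get_bits.24's contract `spec24`]
  81  prep_huffman                                 whole function  needs: __asan_load4_noabort, __asan_store4_noabort, get8_packet_raw, __asan_load1_noabort
  82  bit_reverse                                  whole function  needs: -
  83  codebook_decode_scalar_raw.1                 segment         needs: prep_huffman, __asan_load8_noabort, __asan_load4_noabort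
  84  codebook_decode_scalar_raw.2                 segment         needs: __asan_load4_noabort, bit_reverse, __asan_load8_noabort, __asan_load1_noabort, __asan_store4_noabort
  85  codebook_decode_scalar_raw.3                 segment         needs: __asan_load8_noabort, __asan_load1_noabort, __asan_load4_noabort, error, __asan_store4_noabort
  86  codebook_decode_scalar_raw.4                 segment         needs: -
  87  codebook_decode_scalar_raw.COMPOSITION       COMPOSITION     needs: codebook_decode_scalar_raw.1, codebook_decode_scalar_raw.2, codebook_decode_scalar_raw.3, codebook_decode_scalar_raw.4
  88  make_block_array                             whole function  needs: __asan_store8_noabort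
  89  codebook_decode_deinterleave_repeat.1        segment         needs: __asan_load4_noabort, __asan_load1_noabort, error
  90  codebook_decode_deinterleave_repeat.2        segment         needs: prep_huffman, __asan_load1_noabort, __asan_load4_noabort, error, codebook_decode_scalar_raw.COMPOSITION, __asan_load2_noabort, __asan_load8_noabort
  91  codebook_decode_deinterleave_repeat.3        segment         needs: __asan_load8_noabort, __asan_load4_noabort
  92  codebook_decode_deinterleave_repeat.4        segment         needs: __asan_load8_noabort, __asan_load4_noabort
  93  codebook_decode_deinterleave_repeat.5        segment         needs: -
  94  codebook_decode_deinterleave_repeat.6        segment         needs: __asan_store4_noabort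
  95  codebook_decode_deinterleave_repeat.7        segment         needs: -
  96  codebook_decode_deinterleave_repeat.COMPOSITION COMPOSITION     needs: codebook_decode_deinterleave_repeat.1, codebook_decode_deinterleave_repeat.2, codebook_decode_deinterleave_repeat.3, codebook_decode_deinterleave_repeat.4, codebook_decode_deinterleave_repeat.5, codebook_decode_deinterleave_repeat.6, codebook_decode_deinterleave_repeat.7
  97  codebook_decode_start                        whole function  needs: __asan_load1_noabort, __asan_load4_noabort, __asan_load2_noabort, __asan_load8_noabort, error, prep_huffman, codebook_decode_scalar_raw.COMPOSITION
  98  codebook_decode_step                         whole function  needs: codebook_decode_start, __asan_load4_noabort, __asan_load8_noabort, __asan_load1_noabort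
  99  codebook_decode                              whole function  needs: codebook_decode_start, __asan_load4_noabort, __asan_load1_noabort, __asan_load8_noabort
 100  residue_decode                               whole function  needs: __asan_load4_noabort, codebook_decode_step, codebook_decode
 101  decode_residue.1                             segment         needs: __asan_load8_noabort, __asan_load2_noabort, __asan_load1_noabort, __asan_load4_noabort, setup_temp_malloc, make_block_array
 102  decode_residue.2                             segment         needs: __asan_load1_noabort, __asan_load8_noabort, memset
 103  decode_residue.3                             segment         needs: __asan_load1_noabort
 104  decode_residue.4                             segment         needs: __asan_load8_noabort, codebook_decode_deinterleave_repeat.COMPOSITION, __asan_load4_noabort, __asan_load1_noabort, __asan_load2_noabort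
 105  decode_residue.5                             segment         needs: __asan_load8_noabort, __asan_load1_noabort, __asan_load4_noabort, __asan_load2_noabort, __asan_store8_noabort, prep_huffman, codebook_decode_scalar_raw.COMPOSITION
 106  decode_residue.6                             segment         needs: __asan_load8_noabort, codebook_decode_deinterleave_repeat.COMPOSITION, __asan_load4_noabort, __asan_load1_noabort, __asan_load2_noabort
 107  decode_residue.7                             segment         needs: __asan_load8_noabort, __asan_load1_noabort, __asan_load4_noabort, __asan_load2_noabort, __asan_store8_noabort, prep_huffman, codebook_decode_scalar_raw.COMPOSITION
 108  decode_residue.8                             segment         needs: -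
 109  decode_residue.9                             segment         needs: prep_huffman, codebook_decode_scalar_raw.COMPOSITION, __asan_load1_noabort, __asan_load8_noabort, __asan_load4_noabort, __asan_store8_noabort, __asan_load2_noabort
 110  decode_residue.10                            segment         needs: __asan_load1_noabort, __asan_load8_noabort, __asan_load2_noabort, __asan_load4_noabort, residue_decode
 111  decode_residue.11                            segment         needs: arena_temp_restore
 112  decode_residue.COMPOSITION                   COMPOSITION     needs: decode_residue.1, decode_residue.2, decode_residue.3, decode_residue.4, decode_residue.5, decode_residue.6, decode_residue.7, decode_residue.8, decode_residue.9, decode_residue.10, decode_residue.11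
 113  flush_packet                                 whole function  needs: get8_packet_raw
 114  vorbis_decode_packet_rest.1                  segment         needs: __asan_load1_noabort, __asan_load4_noabort, __asan_load8_noabort
 115  vorbis_decode_packet_rest.2                  segment         needs: __asan_load4_noabort, __asan_load8_noabort, __asan_load1_noabort, __asan_store4_noabort, __asan_load2_noabort, get_bits, ilog, __asan_store2_noabort
 116  vorbis_decode_packet_rest.3                  segment         needs: prep_huffman, codebook_decode_scalar_raw.COMPOSITION, __asan_load1_noabort, __asan_load8_noabort, __asan_load4_noabort, __asan_load2_noabort
 117  vorbis_decode_packet_rest.4                  segment         needs: prep_huffman, codebook_decode_scalar_raw.COMPOSITION, __asan_load1_noabort, __asan_load8_noabort, __asan_load4_noabort, __asan_store2_noabort, __asan_load2_noabort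
 118  vorbis_decode_packet_rest.5                  segment         needs: __asan_load4_noabort, __asan_store1_noabort, __asan_load1_noabort, __asan_load2_noabort, predict_point
 119  vorbis_decode_packet_rest.6                  segment         needs: __asan_load1_noabort, __asan_store2_noabort
 120  vorbis_decode_packet_rest.7                  segment         needs: __asan_store4_noabort
 121  vorbis_decode_packet_rest.8                  segment         needs: memcpy, __asan_load1_noabort, __asan_store4_noabort, __asan_load2_noabort, __asan_load8_noabort, __asan_load4_noabort
 122  vorbis_decode_packet_rest.9                  segment         needs: __asan_store1_noabort, __asan_load8_noabort, __asan_store8_noabort, __asan_load4_noabort, __asan_load1_noabort, decode_residue.COMPOSITION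
 123  vorbis_decode_packet_rest.10                 segment         needs: __asan_load2_noabort, __asan_store4_noabort, __asan_load4_noabort, __asan_load8_noabort, __asan_load1_noabort
 124  vorbis_decode_packet_rest.11                 segment         needs: __asan_load8_noabort, do_floor, __asan_load4_noabort, memset
 125  vorbis_decode_packet_rest.12                 segment         needs: __asan_load1_noabort, __asan_load8_noabort, inverse_mdct.COMPOSITION, __asan_load4_noabort
 126  vorbis_decode_packet_rest.13                 segment         needs: flush_packet, __asan_load1_noabort, __asan_store4_noabort, __asan_load4_noabort
 127  vorbis_decode_packet_rest.14                 segment         needs: __asan_load4_noabort, __asan_store4_noabort, __asan_load1_noabort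
 128  vorbis_decode_packet_rest.15                 segment         needs: -
 129  vorbis_decode_packet_rest.16                 segment         needs: error
 130  vorbis_decode_packet_rest.COMPOSITION        COMPOSITION     needs: vorbis_decode_packet_rest.1, vorbis_decode_packet_rest.2, vorbis_decode_packet_rest.3, vorbis_decode_packet_rest.4, vorbis_decode_packet_rest.5, vorbis_decode_packet_rest.6, vorbis_decode_packet_rest.7, vorbis_decode_packet_rest.8, vorbis_decode_packet_rest.9, vorbis_decode_packet_rest.10, vorbis_decode_packet_rest.11, vorbis_decode_packet_rest.12, vorbis_decode_packet_rest.13, vorbis_decode_packet_rest.14, vorbis_decode_packet_rest.15, vorbis_decode_packet_rest.16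
 131  get8_packet                                  whole function  needs: get8_packet_raw, __asan_store4_noabort
 132  start_packet                                 whole function  needs: __asan_load4_noabort, start_page, __asan_load1_noabort, error, __asan_store4_noabort, __asan_store1_noabort
 133  maybe_start_packet                           whole function  needs: __asan_load4_noabort, start_packet, get8, error, start_page_no_capturepattern, __asan_load1_noabort, __asan_store4_noabort, __asan_store1_noabort
 134  vorbis_decode_initial                        whole function  needs: __asan_store4_noabort, __asan_load4_noabort, maybe_start_packet, get_bits, get8_packet, ilog, __asan_load1_noabort
 135  vorbis_decode_packet                         whole function  needs: vorbis_decode_initial, __asan_load4_noabort, vorbis_decode_packet_rest.COMPOSITION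
 136  stb_vorbis_get_frame_float                   whole function  needs: vorbis_decode_packet, __asan_store4_noabort, vorbis_finish_frame, __asan_load8_noabort, __asan_store8_noabort, __asan_load4_noabort
 137  range_bad                                    whole function  needs: -
 138  __asan_storeN_noabort                        whole function  needs: range_bad
 139  __asan_load16_noabort                        whole function  needs: range_bad
 140  __asan_store16_noabort                       whole function  needs: range_bad
 141  vorbis_init                                  whole function  needs: memset, __asan_store16_noabort, __asan_load16_noabort, __asan_load4_noabort, __asan_store4_noabort, __asan_store8_noabort
 142  setup_malloc                                 whole function  needs: __asan_load8_noabort, __asan_load4_noabort, arena_unpoison, malloc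
 143  vorbis_alloc                                 whole function  needs: setup_malloc
 144  vorbis_pump_first_frame                      whole function  needs: vorbis_decode_packet, vorbis_finish_frame
 145  swap_bytes                                   whole function  needs: __asan_load1_noabort
 146  uint32_compare                               whole function  needs: __asan_load4_noabort
 147  point_compare                                whole function  needs: __asan_load2_noabort
 148  sift_down                                    whole function  needs: swap_bytes   [INDIRECT call]
 149  qsort                                        whole function  needs: sift_down, swap_bytes
 150  crc32_init                                   whole function  needs: __asan_store4_noabort
 151  compute_accelerated_huffman                  whole function  needs: __asan_store2_noabort, __asan_load1_noabort, __asan_load4_noabort, __asan_load8_noabort, bit_reverse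
 152  neighbors                                    whole function  needs: __asan_load2_noabort, __asan_store4_noabort
 153  skip                                         whole function  needs: __asan_load8_noabort, __asan_store4_noabort
 154  add_entry                                    whole function  needs: __asan_load1_noabort, __asan_load8_noabort, __asan_store4_noabort, __asan_store1_noabort
 155  compute_codewords                            whole function  needs: memset, __asan_load1_noabort, add_entry, __asan_store4_noabort, __asan_load4_noabort, bit_reverse
 156  setup_temp_free                              whole function  needs: __asan_load8_noabort, arena_poison, __asan_load4_noabort, free
 157  include_in_sort                              whole function  needs: __asan_load1_noabort
 158  compute_sorted_huffman.1                     segment         needs: __asan_load1_noabort, __asan_load4_noabort, include_in_sort, __asan_load8_noabort, bit_reverse, __asan_store4_noabort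
 159  compute_sorted_huffman.2                     segment         needs: __asan_load4_noabort, __asan_load8_noabort, qsort, __asan_store4_noabort, __asan_load1_noabort, uint32_compare
 160  compute_sorted_huffman.3                     segment         needs: __asan_load1_noabort, include_in_sort, __asan_load4_noabort, __asan_load8_noabort, bit_reverse, __asan_store4_noabort, __asan_store1_noabort
 161  compute_sorted_huffman.4                     segment         needs: -
 162  compute_sorted_huffman.COMPOSITION           COMPOSITION     needs: compute_sorted_huffman.1, compute_sorted_huffman.2, compute_sorted_huffman.3, compute_sorted_huffman.4
 163  memcmp                                       whole function  needs: __asan_load1_noabort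
 164  vorbis_validate                              whole function  needs: memcmp
 165  two_to                                       whole function  needs: -
 166  ldexp                                        whole function  needs: two_to
 167  float32_unpack                               whole function  needs: ldexp
 168  floor                                        whole function  needs: -
 169  exp                                          whole function  needs: two_to, floor, ldexp
 170  log                                          whole function  needs: two_to
 171  pow_int                                      whole function  needs: -
 172  pow                                          whole function  needs: pow_int, log, exp
 173  lookup1_values                               whole function  needs: log, exp, floor, pow
 174  compute_bitreverse                           whole function  needs: ilog, bit_reverse, __asan_store2_noabort
 175  sin_poly                                     whole function  needs: -
 176  cos_poly                                     whole function  needs: -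
 177  sincos_quadrant                              whole function  needs: floor, cos_poly, sin_poly
 178  sin                                          whole function  needs: sincos_quadrant
 179  cos                                          whole function  needs: sincos_quadrant
 180  compute_twiddle_factors                      whole function  needs: cos, __asan_store4_noabort, sin
 181  square                                       whole function  needs: -
 182  compute_window                               whole function  needs: sin, square, __asan_store4_noabort
 183  init_blocksize                               whole function  needs: setup_malloc, __asan_store8_noabort, __asan_load8_noabort, compute_twiddle_factors, compute_window, compute_bitreverse, error
 184  get32_packet                                 whole function  needs: get8_packet
 185  start_decoder.1                              segment         needs: -
 186  start_decoder.2                              segment         needs: __asan_store1_noabort, start_page, __asan_load1_noabort, __asan_load4_noabort, getn, error, get8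
 187  start_decoder.3                              segment         needs: getn, vorbis_validate, get32, get8, __asan_store4_noabort, error
 188  start_decoder.4                              segment         needs: start_page, start_packet, next_segment, get8_packet, error
 189  start_decoder.5                              segment         needs: get8_packet, __asan_store1_noabort, vorbis_validate, get32_packet, setup_malloc, __asan_store8_noabort, error
 190  start_decoder.6                              segment         needs: get8_packet, __asan_load8_noabort, __asan_store1_noabort, get32_packet, __asan_store4_noabort, __asan_store8_noabort, error, setup_malloc, __asan_load4_noabort, memset
 191  start_decoder.7                              segment         needs: error, get8_packet, __asan_load8_noabort, __asan_store1_noabort, __asan_load4_noabort, get32_packet, setup_malloc, __asan_store8_noabort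
 192  start_decoder.8                              segment         needs: get8_packet, __asan_load1_noabort, skip, next_segment, __asan_store1_noabort, error
 193  start_decoder.9                              segment         needs: start_packet, crc32_init, get8_packet, error, __asan_store1_noabort, vorbis_validate, get_bits, __asan_store4_noabort, setup_malloc, __asan_store8_noabort, __asan_load4_noabort, memset
 194  start_decoder.ERR                            segment         needs: -
 195  start_decoder.C1                             segment         needs: -
 196  start_decoder.C2                             segment         needs: __asan_load4_noabort, __asan_load8_noabort, get_bits, __asan_store4_noabort, __asan_store1_noabort, setup_temp_malloc, error, setup_malloc, __asan_store8_noabort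
 197  start_decoder.C3                             segment         needs: get_bits, error, memset, __asan_load4_noabort, ilog
 198  start_decoder.C4                             segment         needs: get_bits, __asan_store1_noabort, __asan_load4_noabort, __asan_load1_noabort, error
 199  start_decoder.C5                             segment         needs: __asan_load1_noabort, __asan_load4_noabort, setup_malloc, __asan_store8_noabort, memcpy, setup_temp_free, __asan_load8_noabort, __asan_store1_noabort, error
 200  start_decoder.C6                             segment         needs: __asan_store4_noabort, __asan_load4_noabort, error, setup_malloc, __asan_store8_noabort, setup_temp_malloc
 201  start_decoder.C7                             segment         needs: __asan_load4_noabort, compute_codewords, __asan_load1_noabort, error, setup_temp_free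
 202  start_decoder.C8                             segment         needs: __asan_load4_noabort, __asan_load1_noabort, setup_malloc, __asan_store8_noabort, memset, __asan_load8_noabort, __asan_store4_noabort, compute_sorted_huffman.COMPOSITION, error, setup_temp_free
 203  start_decoder.C9                             segment         needs: compute_accelerated_huffman, get_bits, __asan_store1_noabort, __asan_load4_noabort, error
 204  start_decoder.C10                            segment         needs: -
 205  start_decoder.C11                            segment         needs: get_bits, float32_unpack, __asan_store4_noabort, __asan_store1_noabort, __asan_load1_noabort, __asan_load4_noabort, setup_temp_malloc, __asan_store2_noabort, lookup1_values, error, setup_temp_free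
 206  start_decoder.C12                            segment         needs: __asan_load1_noabort, __asan_load4_noabort, setup_malloc, __asan_store8_noabort, __asan_load8_noabort, setup_temp_free, error
 207  start_decoder.C13                            segment         needs: __asan_load4_noabort, __asan_load2_noabort, __asan_store4_noabort, __asan_load1_noabort, setup_temp_free, error, __asan_load8_noabort, __asan_store1_noabort
 208  start_decoder.C14                            segment         needs: setup_malloc, __asan_store8_noabort, __asan_load4_noabort, setup_temp_free, error, __asan_load2_noabort, __asan_store4_noabort, __asan_load1_noabort
 209  start_decoder.C15                            segment         needs: __asan_load4_noabort, setup_temp_free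
 210  start_decoder.C16                            segment         needs: get_bits, error
 211  start_decoder.F1                             segment         needs: get_bits, __asan_store4_noabort, setup_malloc, __asan_store8_noabort, error
 212  start_decoder.F2                             segment         needs: __asan_load4_noabort, get_bits, __asan_store2_noabort, __asan_load8_noabort, __asan_store1_noabort, error
 213  start_decoder.F3                             segment         needs: __asan_load8_noabort, get_bits, __asan_store1_noabort, __asan_store2_noabort, __asan_load1_noabort, error
 214  start_decoder.F4                             segment         needs: get_bits, __asan_store1_noabort, __asan_store2_noabort, __asan_load4_noabort, error
 215  start_decoder.F5                             segment         needs: get_bits, __asan_store1_noabort, __asan_store2_noabort, __asan_store4_noabort, __asan_load1_noabort, __asan_load4_noabort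
 216  start_decoder.F6                             segment         needs: __asan_load2_noabort, __asan_store2_noabort, __asan_load4_noabort, qsort, error, __asan_store1_noabort, point_compare
 217  start_decoder.F7                             segment         needs: neighbors, __asan_store1_noabort
 218  start_decoder.R1                             segment         needs: get_bits, __asan_store4_noabort, setup_malloc, __asan_store8_noabort, error, __asan_load4_noabort, memset
 219  start_decoder.R2                             segment         needs: __asan_load4_noabort, get_bits, __asan_store4_noabort, setup_malloc, __asan_store8_noabort, error, memset
 220  start_decoder.R3                             segment         needs: __asan_load8_noabort, get_bits, __asan_store2_noabort, error, __asan_store4_noabort, __asan_load4_noabort, __asan_store1_noabort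
 221  start_decoder.R4                             segment         needs: get_bits, __asan_store1_noabort, __asan_load1_noabort, setup_malloc, __asan_store8_noabort, error
 222  start_decoder.R5                             segment         needs: get_bits, __asan_load8_noabort, __asan_store2_noabort, __asan_load2_noabort, __asan_load4_noabort, __asan_load1_noabort, error
 223  start_decoder.R6                             segment         needs: __asan_load8_noabort, __asan_load1_noabort, __asan_load4_noabort, setup_malloc, __asan_store8_noabort, error, memset
 224  start_decoder.R7                             segment         needs: __asan_load8_noabort, __asan_load1_noabort, __asan_load4_noabort, setup_malloc, __asan_store8_noabort, error, __asan_store1_noabort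
 225  start_decoder.R8                             segment         needs: __asan_load4_noabort, get_bits, __asan_store4_noabort
 226  start_decoder.R9                             segment         needs: __asan_load8_noabort, get_bits, error, __asan_load4_noabort, setup_malloc, __asan_store8_noabort, __asan_store1_noabort, __asan_load1_noabort, __asan_store2_noabort
 227  start_decoder.R10                            segment         needs: ilog, get_bits, __asan_load8_noabort, __asan_store1_noabort, __asan_load4_noabort, __asan_load1_noabort, error
 228  start_decoder.R11                            segment         needs: get_bits, error, __asan_load1_noabort, __asan_load4_noabort, __asan_load8_noabort, __asan_store1_noabort
 229  start_decoder.R12                            segment         needs: get_bits, __asan_store1_noabort, __asan_load1_noabort, __asan_load4_noabort, error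
 230  start_decoder.R13                            segment         needs: flush_packet, __asan_store4_noabort
 231  start_decoder.R14                            segment         needs: get_bits, __asan_store1_noabort, __asan_store2_noabort, __asan_load2_noabort, error, __asan_load4_noabort
 232  start_decoder.R15                            segment         needs: __asan_load4_noabort, init_blocksize, __asan_store4_noabort
 233  start_decoder.R16                            segment         needs: __asan_load4_noabort, setup_malloc, __asan_store8_noabort, __asan_load8_noabort, error, memset
 234  start_decoder.R17                            segment         needs: __asan_load4_noabort, __asan_store4_noabort, __asan_load8_noabort, error
 235  start_decoder.R18                            segment         needs: __asan_load8_noabort, __asan_load2_noabort, __asan_load4_noabort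
 236  start_decoder.R19                            segment         needs: __asan_load4_noabort, stb_vorbis_get_file_offset, __asan_store4_noabort
 237  start_decoder.COMPOSITION                    COMPOSITION     needs: start_decoder.1, start_decoder.2, start_decoder.3, start_decoder.4, start_decoder.5, start_decoder.6, start_decoder.7, start_decoder.8, start_decoder.9, start_decoder.ERR, start_decoder.C1, start_decoder.C2, start_decoder.C3, start_decoder.C4, start_decoder.C5, start_decoder.C6, start_decoder.C7, start_decoder.C8, start_decoder.C9, start_decoder.C10, start_decoder.C11, start_decoder.C12, start_decoder.C13, start_decoder.C14, start_decoder.C15, start_decoder.C16, start_decoder.F1, start_decoder.F2, start_decoder.F3, start_decoder.F4, start_decoder.F5, start_decoder.F6, start_decoder.F7, start_decoder.R1, start_decoder.R2, start_decoder.R3, start_decoder.R4, start_decoder.R5, start_decoder.R6, start_decoder.R7, start_decoder.R8, start_decoder.R9, start_decoder.R10, start_decoder.R11, start_decoder.R12, start_decoder.R13, start_decoder.R14, start_decoder.R15, start_decoder.R16, start_decoder.R17, start_decoder.R18, start_decoder.R19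
 238  stb_vorbis_open_memory                       whole function  needs: vorbis_init, start_decoder.COMPOSITION, vorbis_alloc, __asan_storeN_noabort, memcpy, vorbis_pump_first_frame, __asan_store4_noabort, vorbis_deinit.COMPOSITION
 239  decode_all                                   whole function  needs: stb_vorbis_open_memory, __asan_load4_noabort, stb_vorbis_get_frame_float, copy_frame, put_header, stb_vorbis_get_error, stb_vorbis_close
 240  _start_vorbis                                whole function  needs: run_ctors, decode_all
-/
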